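-- pv_equiv track=rewrite | github.com/damclaugh/udacity_data_structures_algorithms | problems_v_algorithms_project/problem_3.py | max_numbers
-- ===== SOURCE A (Python) =====
-- def max_numbers(sorted_list):
--     """
--     Combine digits of sorted list to create two biggest numbers
--
--     """
--
--     result = []
--     num1 = 0
--     num2 = 0
--
--     for i in range(0, len(sorted_list), 2):
--         num1 = num1*10 + sorted_list[i]
--     result.append(num1)
--
--     for i in range(1, len(sorted_list), 2):
--         num2 = num2*10 + sorted_list[i]
--     result.append(num2)
--
--     return result
-- ===== SOURCE B (Python) =====
-- def max_numbers(sorted_list):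
--     """
--     Combine digits of sorted list to create two biggest numbers
--
--     """
--     evens = sorted_list[::2]
--     odds = sorted_list[1::2]
--
--     def place_value(digits):
--         total = 0
--         weight = 1
--         for d in reversed(digits):
--             total = total + d * weight
--             weight = weight * 10
--         return total
--
--     return [place_value(evens), place_value(odds)]
-- ===== Notes on version B (the rewrite author's own statement) =====
-- stated objective: alternative
-- what changed: Replaces the two index-stepped front-to-back Horner loops by slicing the list into even- and odd-position sublists and accumulating each back-to-front with an explicit running place-value weight.
import Mathlib
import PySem

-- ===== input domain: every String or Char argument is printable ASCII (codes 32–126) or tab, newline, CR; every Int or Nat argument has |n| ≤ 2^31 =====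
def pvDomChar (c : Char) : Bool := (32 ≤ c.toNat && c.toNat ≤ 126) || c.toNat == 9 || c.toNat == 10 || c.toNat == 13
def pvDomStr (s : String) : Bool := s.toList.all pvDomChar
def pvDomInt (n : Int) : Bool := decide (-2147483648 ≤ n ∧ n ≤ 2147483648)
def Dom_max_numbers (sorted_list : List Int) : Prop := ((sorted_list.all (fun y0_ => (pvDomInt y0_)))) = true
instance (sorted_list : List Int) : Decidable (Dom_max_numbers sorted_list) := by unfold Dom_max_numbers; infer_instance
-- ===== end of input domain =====

-- B replaces A's two index-stepped Horner loops by slicing into even/odd-position sublists and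
-- summing explicit place values (alternative decomposition, same asymptotic cost).


-- ===== PORT A =====
-- 'for i in range(0, len, 2): num1 = num1*10 + xs[i]', then the same from 1; every index the
-- range produces is in range, so pyGetD (whose default is never used) is exact where Python indexes.
def max_numbers (sorted_list : List Int) : List Int :=
  let num1 := (PySem.List.pyRange 0 (PySem.List.len sorted_list) 2).foldl
    (fun num1 i => num1 * 10 + PySem.List.pyGetD sorted_list i 0) 0
  let num2 := (PySem.List.pyRange 1 (PySem.List.len sorted_list) 2).foldl
    (fun num2 i => num2 * 10 + PySem.List.pyGetD sorted_list i 0) 0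
  [num1, num2]

-- ===== PORT B =====
-- place_value: 'for d in reversed(digits): total += d * weight; weight *= 10'
def pvPlaceValue (digits : List Int) : Int :=
  (digits.reverse.foldl (fun (p : Int × Int) d => (p.1 + d * p.2, p.2 * 10)) (0, 1)).1

-- evens = xs[::2], odds = xs[1::2]; the step 2 ≠ 0, so slice? is never none and '.getD []' is exact.
def max_numbers_alt (sorted_list : List Int) : List Int :=
  let evens := (PySem.List.slice? sorted_list none none 2).getD []
  let odds := (PySem.List.slice? sorted_list (some 1) none 2).getD []
  [pvPlaceValue evens, pvPlaceValue odds]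

-- ===== PRECONDITION & SPEC =====
def Spec_max_numbers (sorted_list : List Int) (out : List Int) : Prop := out = max_numbers_alt sorted_list
instance (sorted_list : List Int) (out : List Int) : Decidable (Spec_max_numbers sorted_list out) := by unfold Spec_max_numbers; infer_instance

-- ===== CLAIM (what is proved, stated in full; the proofs are below) =====
def Claim_equal_max_numbers : Prop := ∀ (sorted_list : List Int), Dom_max_numbers sorted_list → Spec_max_numbers sorted_list (max_numbers sorted_list)

-- ===== LEMMAS AND PROOFS =====

-- the even-position elements of a list (proof-only helper)
def pvEveryOther : List Int → List Int
  | [] => []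
  | [x] => [x]
  | x :: _ :: rest => x :: pvEveryOther rest

-- A's accumulation, as a fold over the selected elements (proof-only helper)
def pvHorner (ys : List Int) : Int := ys.foldl (fun n d => n * 10 + d) 0

lemma pv_ev_map (xs : List Int) :
    (List.range ((xs.length + 1) / 2)).map (fun k => xs.getD (2 * k) 0) = pvEveryOther xs := by
  induction xs using pvEveryOther.induct with
  | case1 => simp [pvEveryOther]
  | case2 x => simp [pvEveryOther]
  | case3 x y rest ih =>
    have h : ((x :: y :: rest).length + 1) / 2 = (rest.length + 1) / 2 + 1 := by
      simp; omega
    rw [h, List.range_succ_eq_map, List.map_cons, List.map_map]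
    simp only [pvEveryOther, List.getD_cons_zero, Nat.mul_zero]
    refine congrArg (x :: ·) ?_
    rw [← ih]
    apply List.map_congr_left
    intro k _
    have h2 : 2 * (k + 1) = 2 * k + 1 + 1 := by omega
    simp [Function.comp, h2]

lemma pv_ev_filterMap (xs : List Int) :
    (List.range ((xs.length + 1) / 2)).filterMap (fun k => xs[2 * k]?) = pvEveryOther xs := by
  induction xs using pvEveryOther.induct with
  | case1 => simp [pvEveryOther]
  | case2 x => simp [pvEveryOther]
  | case3 x y rest ih =>
    have h : ((x :: y :: rest).length + 1) / 2 = (rest.length + 1) / 2 + 1 := by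
      simp; omega
    rw [h, List.range_succ_eq_map, List.filterMap_cons, List.filterMap_map]
    simp only [pvEveryOther, Nat.mul_zero, List.getElem?_cons_zero]
    refine congrArg (x :: ·) ?_
    rw [← ih]
    apply List.filterMap_congr
    intro k _
    have h2 : 2 * (k + 1) = 2 * k + 1 + 1 := by omega
    simp [Function.comp, h2]

lemma pv_horner_acc (ys : List Int) (a : Int) :
    ys.foldl (fun n d => n * 10 + d) a = a * 10 ^ ys.length + pvHorner ys := by
  induction ys generalizing a with
  | nil => simp [pvHorner]
  | cons d ds ih =>
    rw [List.foldl_cons, ih (a * 10 + d)]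
    have hH : pvHorner (d :: ds) = d * 10 ^ ds.length + pvHorner ds := by
      rw [pvHorner, List.foldl_cons, ih (0 * 10 + d)]
      ring
    simp only [hH, List.length_cons, pow_succ]
    ring

lemma pv_foldr_weight (ys : List Int) :
    ys.foldr (fun d (p : Int × Int) => (p.1 + d * p.2, p.2 * 10)) (0, 1)
      = (pvHorner ys, 10 ^ ys.length) := by
  induction ys with
  | nil => simp [pvHorner]
  | cons d ds ih =>
    have hH : pvHorner (d :: ds) = d * 10 ^ ds.length + pvHorner ds := by
      rw [pvHorner, List.foldl_cons, pv_horner_acc]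
      ring
    simp only [List.foldr_cons, ih, hH, List.length_cons, pow_succ, Prod.mk.injEq]
    exact ⟨by ring, trivial⟩

lemma pv_placeValue_eq (ys : List Int) : pvPlaceValue ys = pvHorner ys := by
  rw [pvPlaceValue, List.foldl_reverse]
  rw [pv_foldr_weight ys]

lemma pv_A_even (xs : List Int) :
    (PySem.List.pyRange 0 (PySem.List.len xs) 2).foldl
      (fun n i => n * 10 + PySem.List.pyGetD xs i 0) 0 = pvHorner (pvEveryOther xs) := by
  rw [PySem.List.len_eq, PySem.List.pyRange_of_pos 0 (xs.length : Int) (by norm_num),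
      List.foldl_map]
  have hc : (if (0:Int) < (xs.length : Int) then (((xs.length : Int) - 0 + 2 - 1) / 2).toNat else 0)
      = (xs.length + 1) / 2 := by split <;> omega
  rw [hc, ← pv_ev_map xs]
  unfold pvHorner
  rw [List.foldl_map]
  congr 1
  funext n k
  have h1 : (0 : Int) + 2 * (k : Int) = ((2 * k : Nat) : Int) := by push_cast; ring
  rw [h1, PySem.List.pyGetD_natCast]

lemma pv_A_odd (xs : List Int) :
    (PySem.List.pyRange 1 (PySem.List.len xs) 2).foldl
      (fun n i => n * 10 + PySem.List.pyGetD xs i 0) 0 = pvHorner (pvEveryOther xs.tail) := by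
  rw [PySem.List.len_eq, PySem.List.pyRange_of_pos 1 (xs.length : Int) (by norm_num),
      List.foldl_map]
  have hc : (if (1:Int) < (xs.length : Int) then (((xs.length : Int) - 1 + 2 - 1) / 2).toNat else 0)
      = (xs.tail.length + 1) / 2 := by
    rcases xs with _ | ⟨x, t⟩
    · simp
    · simp only [List.length_cons, List.tail_cons]
      split <;> omega
  rw [hc, ← pv_ev_map xs.tail]
  unfold pvHorner
  rw [List.foldl_map]
  congr 1
  funext n k
  have h1 : (1 : Int) + 2 * (k : Int) = ((2 * k + 1 : Nat) : Int) := by push_cast; ring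
  rw [h1, PySem.List.pyGetD_natCast]
  rcases xs with _ | ⟨x, t⟩ <;> simp

lemma pv_B_even (xs : List Int) :
    (PySem.List.slice? xs none none 2).getD [] = pvEveryOther xs := by
  rw [← pv_ev_filterMap xs]
  simp only [PySem.List.slice?, PySem.List.sliceIndices]
  norm_num
  have hc : (if 0 < xs.length then (((xs.length : Int) + 2 - 1) / 2).toNat else 0)
      = (xs.length + 1) / 2 := by split <;> omega
  rw [hc]
  apply List.filterMap_congr
  intro k _
  have h1 : ((2 * (k : Int))).toNat = 2 * k := by omega
  rw [h1]

lemma pv_B_odd (xs : List Int) :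
    (PySem.List.slice? xs (some 1) none 2).getD [] = pvEveryOther xs.tail := by
  rw [← pv_ev_filterMap xs.tail]
  simp only [PySem.List.slice?, PySem.List.sliceIndices]
  norm_num
  rcases xs with _ | ⟨x, t⟩
  · simp
  · have hmin : min (1:Int) ((x :: t).length : Int) = 1 := by simp
    rw [hmin]
    have hc : (if 1 < (x :: t).length then ((((x :: t).length : Int) - 1 + 2 - 1) / 2).toNat else 0)
        = ((x :: t).length - 1 + 1) / 2 := by
      simp only [List.length_cons]
      split <;> omega
    rw [hc]
    apply List.filterMap_congr
    intro k _
    have h1 : ((1 : Int) + 2 * (k : Int)).toNat = 2 * k + 1 := by omega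
    rw [h1]

-- ===== VERDICT (by name: the statement is the Claim_ definition above) =====
theorem max_numbers_spec : Claim_equal_max_numbers := by
  intro xs _
  unfold Spec_max_numbers
  simp only [max_numbers, max_numbers_alt]
  rw [pv_A_even, pv_A_odd, pv_B_even, pv_B_odd, pv_placeValue_eq, pv_placeValue_eq]
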